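-- pv_equiv track=rewrite | github.com/teljoa/p | PYTHON/Tema 2/Ejercicios/Boletin Modular 2/Boletin completo.py | getNumberOfDigitsOctal
-- ===== SOURCE A (Python) =====
-- def getNumberOfDigitsOctal(number):
--     count=0
--     listdot=" "
--     listothers=""
--     for i in range(len(number)):
--         if(number[i]=="."):
--             listdot+=number[i]
--         if not(number[i]=="0" or number[i]=="1" or number[i]=="2" or number[i]=="3" or number[i]=="4" or number[i]=="5" or number[i]=="6" or number[i]=="7" or number[i]=="." or number[i]=="-"):
--             listothers+=number[i]
--         if("-." in number)or (len(listothers)>0)or("-"in number[1:-1])or("-"in number[-1])or("." in (number[0] or number[-1]))or(".." in number)or(".." in listdot):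
--             count=None
--         elif ("0" in number[i]) or ("1"in number[i]) or ("2"in number[i]) or ("3"in number[i]) or ("4"in number[i]) or ("5"in number[i]) or ("6"in number[i]) or ("7"in number[i]):
--             count+=1
--     return count
-- ===== SOURCE B (Python) =====
-- def getNumberOfDigitsOctal(number):
--     if len(number) == 0:
--         return 0
--     count = 0
--     state = 0  # 0=start, 1=after leading '-', 2=in integer digits, 3=after the dot
--     for c in number:
--         if c in "01234567":
--             count += 1
--             if state <= 1:
--                 state = 2
--         elif c == "-" and state == 0:
--             state = 1
--         elif c == "." and state == 2:
--             state = 3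
--         else:
--             return None
--     return count if state >= 2 else None
-- ===== Notes on version B (the rewrite author's own statement) =====
-- stated objective: faster
-- what changed: Replaced A's loop that re-scans the whole string with substring tests at every character by a single-pass four-state machine that validates the octal-literal shape and counts digits in one traversal.
import Mathlib
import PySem

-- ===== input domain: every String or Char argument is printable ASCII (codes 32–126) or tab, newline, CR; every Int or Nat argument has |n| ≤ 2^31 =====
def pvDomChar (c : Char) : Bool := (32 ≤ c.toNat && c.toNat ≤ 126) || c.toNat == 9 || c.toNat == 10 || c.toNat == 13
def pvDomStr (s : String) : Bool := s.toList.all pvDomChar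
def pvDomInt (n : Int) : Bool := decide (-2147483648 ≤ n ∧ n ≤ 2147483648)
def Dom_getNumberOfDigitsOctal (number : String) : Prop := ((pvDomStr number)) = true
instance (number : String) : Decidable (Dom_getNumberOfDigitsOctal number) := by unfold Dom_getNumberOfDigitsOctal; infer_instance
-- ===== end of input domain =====

-- B replaces A's per-character re-scanning of the whole string with a single-pass
-- four-state machine (validate + count in one traversal); objective: faster (O(n) vs O(n^2)).


-- ===== PORT A =====
-- One iteration of A's for-loop body; c = number[i]; state = (count, listdot, listothers).
-- Python's `"-" in number[-1]` / `"." in (number[0] or number[-1])` test membership in the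
-- 1-char string number[-1] / number[0] (number[0] is nonempty, hence truthy, so the `or`
-- yields number[0]); indices 0, -1 and i are always in range inside the loop (the loop runs
-- only when the string is nonempty), so the .getD default is never used.
-- `count += 1` on count = None would raise in Python; it is unreachable (once count is None
-- the first branch fires forever), and the port keeps none there via Option.map.
def pvAStep (s : List Char) (st : Option Int × List Char × List Char) (c : Char) :
    Option Int × List Char × List Char :=
  let listdot := if c = '.' then st.2.1 ++ [c] else st.2.1
  let listothers :=
    if ¬(c = '0' ∨ c = '1' ∨ c = '2' ∨ c = '3' ∨ c = '4' ∨ c = '5' ∨ c = '6' ∨ c = '7' ∨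
         c = '.' ∨ c = '-')
    then st.2.2 ++ [c] else st.2.2
  let count :=
    if PySem.Chars.isIn ['-', '.'] s ∨ listothers.length > 0 ∨
       PySem.Chars.isIn ['-'] (PySem.List.slice s (some 1) (some (-1))) ∨
       PySem.Chars.isIn ['-'] [PySem.List.pyGetD s (-1) ' '] ∨
       PySem.Chars.isIn ['.'] [PySem.List.pyGetD s 0 ' '] ∨
       PySem.Chars.isIn ['.', '.'] s ∨
       PySem.Chars.isIn ['.', '.'] listdot
    then none
    else if PySem.Chars.isIn ['0'] [c] ∨ PySem.Chars.isIn ['1'] [c] ∨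
            PySem.Chars.isIn ['2'] [c] ∨ PySem.Chars.isIn ['3'] [c] ∨
            PySem.Chars.isIn ['4'] [c] ∨ PySem.Chars.isIn ['5'] [c] ∨
            PySem.Chars.isIn ['6'] [c] ∨ PySem.Chars.isIn ['7'] [c]
    then st.1.map (· + 1)
    else st.1
  (count, listdot, listothers)

def getNumberOfDigitsOctal (number : String) : Option Int :=
  let s := number.toList
  -- count=0, listdot=" ", listothers=""
  ((PySem.List.pyRange 0 (PySem.List.len s)).foldl
      (fun st i => pvAStep s st (PySem.List.pyGetD s i ' '))
      ((some 0 : Option Int), ([' '] : List Char), ([] : List Char))).1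

-- ===== PORT B =====
-- state: 0 = start, 1 = after leading '-', 2 = in integer digits, 3 = after the dot
def pvBLoop : List Char → Int → Int → Option Int
  | [], count, state => if state ≥ 2 then some count else none
  | c :: rest, count, state =>
    if ['0', '1', '2', '3', '4', '5', '6', '7'].contains c then
      pvBLoop rest (count + 1) (if state ≤ 1 then 2 else state)
    else if c = '-' ∧ state = 0 then pvBLoop rest count 1
    else if c = '.' ∧ state = 2 then pvBLoop rest count 3
    else none

def getNumberOfDigitsOctal_alt (number : String) : Option Int :=
  if PySem.Str.len number = 0 then some 0
  else pvBLoop number.toList 0 0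

-- ===== PRECONDITION & SPEC =====
def Spec_getNumberOfDigitsOctal (number : String) (out : Option Int) : Prop := out = getNumberOfDigitsOctal_alt number
instance (number : String) (out : Option Int) : Decidable (Spec_getNumberOfDigitsOctal number out) := by unfold Spec_getNumberOfDigitsOctal; infer_instance

-- ===== CLAIM (what is proved, stated in full; the proofs are below) =====
def Claim_equal_getNumberOfDigitsOctal : Prop := ∀ (number : String), Dom_getNumberOfDigitsOctal number → Spec_getNumberOfDigitsOctal number (getNumberOfDigitsOctal number)


-- ===== LEMMAS AND PROOFS =====

-- an octal digit character
def pvOct (c : Char) : Bool := ['0', '1', '2', '3', '4', '5', '6', '7'].contains c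
-- a character A tolerates (does not append to listothers)
def pvValid (c : Char) : Bool := pvOct c || c = '.' || c = '-'
-- closed form both loops reduce to: a valid octal literal shape
def pvGood (s : List Char) : Bool :=
  s.all pvValid && s.count '.' ≤ 1 && !(decide (['-', '.'] <:+: s)) &&
  !(decide ('-' ∈ (s.drop 1).dropLast)) && !(s.getLast? == some '-') && !(s.head? == some '.')
def pvCnt (s : List Char) : Int := (s.countP pvOct : Int)
-- what B accepts from state 2 on: octal digits with at most one dot
def pvTail2 (s : List Char) : Bool := s.all (fun c => pvOct c || c = '.') && s.count '.' ≤ 1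
-- the "global" part of A's validity test (independent of the loop state)
def pvG (s : List Char) : Bool :=
  PySem.Chars.isIn ['-', '.'] s ||
  PySem.Chars.isIn ['-'] (PySem.List.slice s (some 1) (some (-1))) ||
  PySem.Chars.isIn ['-'] [PySem.List.pyGetD s (-1) ' '] ||
  PySem.Chars.isIn ['.'] [PySem.List.pyGetD s 0 ' '] ||
  PySem.Chars.isIn ['.', '.'] s
-- A's count is None exactly when pvBad holds for the processed prefix p
def pvBad (s p : List Char) : Bool :=
  pvG s || p.any (fun c => !pvValid c) || 2 ≤ p.count '.'
-- A's full loop state after processing prefix p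
def pvState (s p : List Char) : Option Int × List Char × List Char :=
  (if !p.isEmpty && pvBad s p then none else some (pvCnt p),
   ' ' :: p.filter (fun c => c = '.'),
   p.filter (fun c => !pvValid c))

theorem pvOct_ne (c : Char) (h : pvOct c = true) : c ≠ '.' ∧ c ≠ '-' := by
  simp [pvOct] at h
  rcases h with h|h|h|h|h|h|h|h <;> subst h <;> exact ⟨by decide, by decide⟩

theorem pvB3 (s : List Char) (k : Int) :
    pvBLoop s k 3 = if s.all pvOct then some (k + (s.countP pvOct : Int)) else none := by
  induction s generalizing k with
  | nil => simp [pvBLoop]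
  | cons c r ih =>
    by_cases hc : pvOct c = true
    · have hif : (['0', '1', '2', '3', '4', '5', '6', '7'].contains c) := hc
      simp only [pvBLoop, if_pos hif]
      have h3 : ¬ ((3:Int) ≤ 1) := by norm_num
      rw [if_neg h3, ih]
      simp [List.all_cons, hc]
      split_ifs <;> simp <;> ring
    · have hif : ¬ (['0', '1', '2', '3', '4', '5', '6', '7'].contains c) := hc
      simp only [pvBLoop, if_neg hif]
      have : ¬ (c = '-' ∧ (3:Int) = 0) := by rintro ⟨_, h⟩; norm_num at h
      rw [if_neg this]
      have : ¬ (c = '.' ∧ (3:Int) = 2) := by rintro ⟨_, h⟩; norm_num at h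
      rw [if_neg this]
      simp [List.all_cons, hc]

theorem pvB2 (s : List Char) (k : Int) :
    pvBLoop s k 2 = if pvTail2 s then some (k + pvCnt s) else none := by
  induction s generalizing k with
  | nil => simp [pvBLoop, pvTail2, pvCnt]
  | cons c r ih =>
    by_cases hc : pvOct c = true
    · have hif : (['0', '1', '2', '3', '4', '5', '6', '7'].contains c) := hc
      simp only [pvBLoop, if_pos hif]
      have h2 : ¬ ((2:Int) ≤ 1) := by norm_num
      rw [if_neg h2, ih]
      have hcd := (pvOct_ne c hc).1
      simp [pvTail2, pvCnt, List.all_cons, hc, List.count_cons, hcd, List.countP_cons]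
      split_ifs <;> simp <;> ring
    · have hif : ¬ (['0', '1', '2', '3', '4', '5', '6', '7'].contains c) := hc
      simp only [pvBLoop, if_neg hif]
      have hm : ¬ (c = '-' ∧ (2:Int) = 0) := by rintro ⟨_, h⟩; norm_num at h
      rw [if_neg hm]
      by_cases hd : c = '.'
      · rw [if_pos ⟨hd, trivial⟩, pvB3]
        subst hd
        have hkey : pvTail2 ('.' :: r) = true ↔ r.all pvOct = true := by
          simp [pvTail2, List.count_cons, List.all_eq_true]
          constructor
          · rintro ⟨h1, h2⟩ c hc
            have hdot : ('.':Char) ∉ r := List.count_eq_zero.mp (by omega)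
            rcases (h1 c hc) with h|h
            · exact h
            · exact absurd (h ▸ hc) hdot
          · intro h
            refine ⟨fun c hc => Or.inl (h c hc), ?_⟩
            have hdot : ('.':Char) ∉ r := fun hm => by have := h _ hm; simp [pvOct] at this
            simp [List.count_eq_zero.mpr hdot]
        by_cases hall : r.all pvOct = true
        · rw [if_pos hall, if_pos (hkey.mpr hall)]
          simp [pvCnt, List.countP_cons]
        · rw [if_neg hall, if_neg (fun h => hall (hkey.mp h))]
      · rw [if_neg (by rintro ⟨h, _⟩; exact hd h)]
        have : pvTail2 (c :: r) = false := by
          simp [pvTail2, List.all_cons]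
          intro h; exact absurd (h.resolve_right hd) hc
        rw [this]; simp

theorem pv_mem_split_last {α : Type} (l : List α) (d : α) (h : d ∈ l) :
    d ∈ l.dropLast ∨ l.getLast? = some d := by
  induction l with
  | nil => simp at h
  | cons a t ih =>
    cases t with
    | nil => simp at h; simp [h]
    | cons b t2 =>
      rcases List.mem_cons.mp h with h1 | h1
      · subst h1; left; simp
      · rcases ih h1 with h2 | h2
        · left; rw [show (a::b::t2).dropLast = a :: (b::t2).dropLast from rfl]; simp [h2]
        · right; simpa [List.getLast?_cons_cons] using h2


-- characters of a pvTail2/all-oct list are never '-'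
theorem pv_no_minus (l : List Char) (h : ∀ d ∈ l, (pvOct d || (d = '.' : Bool)) = true) :
    ('-' : Char) ∉ l := by
  intro hm
  have := h _ hm
  simp [pvOct] at this

theorem pvGood_cons_oct (c : Char) (r : List Char) (hc : pvOct c = true) :
    pvGood (c :: r) = pvTail2 r := by
  have hcd := pvOct_ne c hc
  have hvc : pvValid c = true := by simp [pvValid, hc]
  rw [Bool.eq_iff_iff]
  simp only [pvGood, pvTail2, Bool.and_eq_true, Bool.not_eq_true', List.all_eq_true,
    decide_eq_false_iff_not, beq_eq_false_iff_ne, List.all_cons, List.count_cons,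
    List.drop_one, List.tail_cons, decide_eq_true_eq]
  constructor
  · rintro ⟨⟨⟨⟨⟨h1, h2⟩, h3⟩, h4⟩, h5⟩, h6⟩
    have hlast : (c :: r).getLast? ≠ some '-' := by simpa using h5
    refine ⟨fun d hd => ?_, ?_⟩
    · have hv := h1.2 d hd
      have hdm : d ≠ '-' := by
        intro he; subst he
        rcases pv_mem_split_last r '-' hd with hm | hm
        · exact h4 hm
        · cases r with
          | nil => simp at hd
          | cons b t =>
            rw [List.getLast?_cons_cons, hm] at hlast
            exact hlast rfl
      simp [pvValid, hdm] at hv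
      simpa using hv
    · have : ¬ c = '.' := hcd.1
      simp [this] at h2
      omega
  · rintro ⟨h1, h2⟩
    have hnm : ('-' : Char) ∉ c :: r := by
      intro hm
      rcases List.mem_cons.mp hm with hm | hm
      · exact hcd.2 hm.symm
      · exact pv_no_minus r h1 hm
    refine ⟨⟨⟨⟨⟨⟨hvc, fun d hd => ?_⟩, ?_⟩, ?_⟩, ?_⟩, ?_⟩, ?_⟩
    · have hv := h1 d hd
      simp only [Bool.or_eq_true, decide_eq_true_eq] at hv
      simp only [pvValid, Bool.or_eq_true, decide_eq_true_eq]
      tauto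
    · have hne : (c == '.') = false := by simp [hcd.1]
      rw [hne]; simp; omega
    · intro hinf
      exact hnm (hinf.subset (by simp))
    · intro hm
      exact hnm (List.mem_cons_of_mem _ (List.dropLast_subset r hm))
    · simp only [beq_eq_false_iff_ne, ne_eq]
      intro hlast
      exact hnm (List.mem_of_getLast? hlast)
    · simp [hcd.1]


theorem pvGood_cons_minus (d : Char) (r2 : List Char) :
    pvGood ('-' :: d :: r2) = (pvOct d && pvTail2 r2) := by
  rw [Bool.eq_iff_iff]
  simp only [pvGood, pvTail2, Bool.and_eq_true, Bool.not_eq_true', List.all_eq_true,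
    decide_eq_false_iff_not, List.all_cons, List.count_cons,
    List.drop_one, List.tail_cons, decide_eq_true_eq, beq_eq_false_iff_ne, ne_eq]
  constructor
  · rintro ⟨⟨⟨⟨⟨h1, h2⟩, h3⟩, h4⟩, h5⟩, h6⟩
    have hlast : ('-' :: d :: r2).getLast? ≠ some '-' := by simpa using h5
    rw [List.getLast?_cons_cons] at hlast
    have hdd : d ≠ '.' := by
      intro he; subst he
      exact h3 ⟨[], r2, rfl⟩
    have hdm : d ≠ '-' := by
      intro he; subst he
      rcases pv_mem_split_last ('-' :: r2) '-' (List.mem_cons_self) with hm | hm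
      · exact h4 hm
      · exact hlast (hm ▸ rfl)
    have hod : pvOct d = true := by
      have hv := h1.2.1
      simp [pvValid, hdd, hdm] at hv
      exact hv
    refine ⟨hod, fun e he => ?_, ?_⟩
    · have hv := h1.2.2 e he
      have hem : e ≠ '-' := by
        intro hee; subst hee
        rcases pv_mem_split_last (d :: r2) '-' (List.mem_cons_of_mem _ he) with hm | hm
        · exact h4 hm
        · exact hlast (hm ▸ rfl)
      simp only [pvValid, Bool.or_eq_true, decide_eq_true_eq] at hv
      simp only [Bool.or_eq_true, decide_eq_true_eq]
      tauto
    · have h2' : (d == '.') = false := by simp [hdd]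
      simp [h2'] at h2
      omega
  · rintro ⟨hod, h1, h2⟩
    have hdp := pvOct_ne d hod
    have hnm : ('-' : Char) ∉ d :: r2 := by
      intro hm
      rcases List.mem_cons.mp hm with hm | hm
      · exact hdp.2 hm.symm
      · exact pv_no_minus r2 h1 hm
    refine ⟨⟨⟨⟨⟨⟨by simp [pvValid], by simp [pvValid, hod], fun e he => ?_⟩, ?_⟩, ?_⟩, ?_⟩, ?_⟩, ?_⟩
    · have hv := h1 e he
      simp only [Bool.or_eq_true, decide_eq_true_eq] at hv
      simp only [pvValid, Bool.or_eq_true, decide_eq_true_eq]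
      tauto
    · have h2' : (d == '.') = false := by simp [hdp.1]
      simp [h2']
      omega
    · intro hinf
      rcases List.infix_cons_iff.mp hinf with hpre | hinf2
      · exact hdp.1 (List.cons_prefix_cons.mp (List.cons_prefix_cons.mp hpre).2).1.symm
      · exact hnm (hinf2.subset (by simp))
    · intro hm
      exact hnm (List.dropLast_subset _ hm)
    · rw [List.getLast?_cons_cons]
      intro hlast
      exact hnm (List.mem_of_getLast? hlast)
    · simp

theorem pvGood_cons_other (c : Char) (r : List Char) (hc : pvOct c = false) (hm : c ≠ '-') :
    pvGood (c :: r) = false := by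
  by_cases hd : c = '.'
  · subst hd; simp [pvGood]
  · have : pvValid c = false := by simp [pvValid, hc, hd, hm]
    simp [pvGood, List.all_cons, this]

theorem pvB_closed (s : List Char) (hne : s ≠ []) :
    pvBLoop s 0 0 = if pvGood s then some (pvCnt s) else none := by
  cases s with
  | nil => exact absurd rfl hne
  | cons c r =>
    by_cases hc : pvOct c = true
    · have hif : (['0', '1', '2', '3', '4', '5', '6', '7'].contains c) := hc
      simp only [pvBLoop, if_pos hif]
      norm_num
      rw [pvB2, pvGood_cons_oct c r hc]
      split_ifs with h
      · simp [pvCnt, List.countP_cons, hc]; ring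
      · rfl
    · have hif : ¬ (['0', '1', '2', '3', '4', '5', '6', '7'].contains c) := hc
      simp only [pvBLoop, if_neg hif]
      by_cases hm : c = '-'
      · subst hm
        rw [if_pos ⟨rfl, trivial⟩]
        cases r with
        | nil => simp [pvBLoop, pvGood]
        | cons d r2 =>
          rw [pvGood_cons_minus]
          by_cases hod : pvOct d = true
          · have hifd : (['0', '1', '2', '3', '4', '5', '6', '7'].contains d) := hod
            simp only [pvBLoop, if_pos hifd]
            norm_num
            rw [pvB2]
            by_cases ht : pvTail2 r2 = true
            · rw [if_pos ht, if_pos (by simp [hod, ht])]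
              have hmo : pvOct '-' = false := by decide
              simp [pvCnt, List.countP_cons, hod, hmo]
              ring
            · rw [if_neg ht, if_neg (by simp [ht])]
          · have hifd : ¬ (['0', '1', '2', '3', '4', '5', '6', '7'].contains d) := hod
            simp only [pvBLoop, if_neg hifd]
            have hx1 : ¬ (d = '-' ∧ (1:Int) = 0) := by rintro ⟨_, h⟩; norm_num at h
            have hx2 : ¬ (d = '.' ∧ (1:Int) = 2) := by rintro ⟨_, h⟩; norm_num at h
            rw [if_neg hx1, if_neg hx2]
            simp [hod]
      · have hx1 : ¬ (c = '-' ∧ True) := fun h => hm h.1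
        have hx2 : ¬ (c = '.' ∧ (0:Int) = 2) := by rintro ⟨_, h⟩; norm_num at h
        rw [if_neg hx1, if_neg hx2]
        rw [pvGood_cons_other c r (by simpa using hc) hm]
        simp

theorem slice1neg1 (l : List Char) : PySem.List.slice l (some 1) (some (-1)) = l.tail.dropLast := by
  unfold PySem.List.slice PySem.List.clampIdx
  cases l with
  | nil => simp
  | cons a t =>
    have h1 : ¬ ((1:Int) < 0) := by norm_num
    have h2 : ((-1:Int) < 0) := by norm_num
    have h3 : ¬ ((((t.length + 1 : Nat) : Int)) + (-1) < 0) := by push_cast; omega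
    simp only [List.length_cons, if_neg h1, if_pos h2, if_neg h3]
    have e2 : ((((t.length + 1 : Nat) : Int)) + (-1)).toNat = t.length := by omega
    rw [e2]
    have e1 : min (Int.toNat 1) (t.length + 1) = 1 := by omega
    rw [e1]
    simp [List.dropLast_eq_take]

theorem pv_pyGetDneg1 (l : List Char) (h : l ≠ []) :
    PySem.List.pyGetD l (-1) ' ' = (l.getLast?).getD ' ' := by
  unfold PySem.List.pyGetD PySem.List.pyGet? PySem.List.pyIdx?
  have hlen : 1 ≤ l.length := List.length_pos_iff.mpr h
  have h1 : ¬ ((0:Int) ≤ -1) := by norm_num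
  have h2 : (-(l.length:Int)) ≤ -1 := by omega
  simp only [if_neg h1, if_pos h2]
  have e : l.length - (Int.toNat (-(-1))) = l.length - 1 := by omega
  rw [e, List.getLast?_eq_getElem?]
  simp

theorem pv_pyGetD0 (l : List Char) :
    PySem.List.pyGetD l 0 ' ' = (l.head?).getD ' ' := by
  unfold PySem.List.pyGetD PySem.List.pyGet? PySem.List.pyIdx?
  cases l with
  | nil => simp
  | cons a t => simp

theorem pv_isIn_single (a c : Char) : PySem.Chars.isIn [a] [c] = (c == a) := by
  rw [Bool.eq_iff_iff]
  rw [PySem.Chars.isIn_iff_infix, List.singleton_infix_iff, List.mem_singleton, beq_iff_eq, eq_comm]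

-- ".." is in " " ++ listdot exactly when at least two dots have been seen
theorem pv_dots (p : List Char) :
    PySem.Chars.isIn ['.', '.'] (' ' :: p.filter (fun c => c = '.')) = true ↔
      2 ≤ p.count '.' := by
  have hall : ∀ d ∈ p.filter (fun c => c = '.'), d = '.' := by
    intro d hd
    have := List.of_mem_filter hd
    simpa using this
  have hlen : (p.filter (fun c => c = '.')).length = p.count '.' := by
    simp only [List.count_eq_countP, List.countP_eq_length_filter, eq_comm]
    have he : (fun x => x == '.') = (fun c => decide (c = '.')) := by
      funext c; rfl
    rw [he]
  rw [PySem.Chars.isIn_iff_infix]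
  constructor
  · intro hinf
    have hsub := hinf.sublist
    have hcnt := hsub.count_le '.'
    simp at hcnt
    have : List.count '.' (p.filter (fun c => c = '.')) = (p.filter (fun c => c = '.')).length := by
      rw [List.count_eq_length]
      intro b hb; exact (hall b hb).symm
    omega
  · intro h2
    rcases hl : p.filter (fun c => c = '.') with _ | ⟨d1, _ | ⟨d2, t⟩⟩
    · rw [hl] at hlen; simp at hlen; omega
    · rw [hl] at hlen; simp at hlen; omega
    · have h1 : d1 = '.' := hall d1 (by rw [hl]; simp)
      have h2' : d2 = '.' := hall d2 (by rw [hl]; simp [List.mem_cons])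
      rw [h1, h2']
      exact List.infix_cons_iff.mpr (Or.inr ⟨[], t, rfl⟩)

-- the loop-invariant "global" part of A's validity test (independent of the loop state)
theorem pvBad_mono (s p : List Char) (c : Char) (h : pvBad s p = true) :
    pvBad s (p ++ [c]) = true := by
  simp only [pvBad, Bool.or_eq_true, decide_eq_true_eq, List.any_append, List.count_append] at h ⊢
  rcases h with (h | h) | h
  · tauto
  · tauto
  · right; omega

theorem pv_filter_len (l : List Char) :
    (l.filter (fun c => !pvValid c)).length > 0 ↔ l.any (fun c => !pvValid c) = true := by
  rw [gt_iff_lt, List.length_pos_iff, Ne, List.filter_eq_nil_iff, List.any_eq_true]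
  push_neg
  constructor
  · rintro ⟨a, ha, h⟩; exact ⟨a, ha, by simpa using h⟩
  · rintro ⟨a, ha, h⟩; exact ⟨a, ha, by simpa using h⟩

theorem pv_hcond (s p : List Char) (c : Char) : (PySem.Chars.isIn ['-', '.'] s ∨
        ((p ++ [c]).filter (fun c => !pvValid c)).length > 0 ∨
        PySem.Chars.isIn ['-'] (PySem.List.slice s (some 1) (some (-1))) = true ∨
        PySem.Chars.isIn ['-'] [PySem.List.pyGetD s (-1) ' '] = true ∨
        PySem.Chars.isIn ['.'] [PySem.List.pyGetD s 0 ' '] = true ∨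
        PySem.Chars.isIn ['.', '.'] s = true ∨
        PySem.Chars.isIn ['.', '.'] (' ' :: (p ++ [c]).filter (fun c => c = '.')) = true) ↔
      pvBad s (p ++ [c]) = true := by
    rw [pv_filter_len, pv_dots (p ++ [c])]
    simp only [pvBad, pvG, Bool.or_eq_true, decide_eq_true_eq]
    tauto

theorem pv_hdig (c : Char) : (PySem.Chars.isIn ['0'] [c] ∨ PySem.Chars.isIn ['1'] [c] ∨
      PySem.Chars.isIn ['2'] [c] ∨ PySem.Chars.isIn ['3'] [c] ∨
      PySem.Chars.isIn ['4'] [c] ∨ PySem.Chars.isIn ['5'] [c] ∨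
      PySem.Chars.isIn ['6'] [c] ∨ PySem.Chars.isIn ['7'] [c]) ↔ pvOct c = true := by
  simp only [pv_isIn_single, pvOct, List.contains_eq_mem]
  simp [beq_iff_eq]

theorem pvAStep_state (s p : List Char) (c : Char) :
    pvAStep s (pvState s p) c = pvState s (p ++ [c]) := by
  unfold pvAStep
  have hval : (c = '0' ∨ c = '1' ∨ c = '2' ∨ c = '3' ∨ c = '4' ∨ c = '5' ∨ c = '6' ∨ c = '7' ∨
       c = '.' ∨ c = '-') ↔ pvValid c = true := by
    simp [pvValid, pvOct, List.contains_eq_mem]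
    tauto
  have hdot : (if c = '.' then (pvState s p).2.1 ++ [c] else (pvState s p).2.1) =
      ' ' :: (p ++ [c]).filter (fun c => c = '.') := by
    unfold pvState
    rw [List.filter_append]
    by_cases h : c = '.'
    · simp [h]
    · simp [h]
  have hoth : (if ¬(c = '0' ∨ c = '1' ∨ c = '2' ∨ c = '3' ∨ c = '4' ∨ c = '5' ∨ c = '6' ∨
        c = '7' ∨ c = '.' ∨ c = '-') then (pvState s p).2.2 ++ [c] else (pvState s p).2.2) =
      (p ++ [c]).filter (fun c => !pvValid c) := by
    unfold pvState
    rw [List.filter_append]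
    by_cases h : pvValid c = true
    · rw [if_neg (not_not_intro (hval.mpr h))]
      simp [h]
    · rw [if_pos (fun hP => h (hval.mp hP))]
      simp [h]
  dsimp only
  rw [hdot, hoth]
  by_cases hb : pvBad s (p ++ [c]) = true
  · rw [if_pos ((pv_hcond s p c).mpr hb)]
    unfold pvState
    have he : (!(p ++ [c]).isEmpty && pvBad s (p ++ [c])) = true := by
      simp [hb]
    rw [he]
    simp
  · rw [if_neg (fun h => hb ((pv_hcond s p c).mp h))]
    have hbp : (!p.isEmpty && pvBad s p) = false := by
      rcases hbb : pvBad s p with _ | _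
      · simp
      · exact absurd (pvBad_mono s p c hbb) hb
    have hbq : (!(p ++ [c]).isEmpty && pvBad s (p ++ [c])) = false := by
      simp [hb]
    unfold pvState
    rw [hbp, hbq]
    simp only [Bool.false_eq_true, if_false]
    by_cases hd : pvOct c = true
    · rw [if_pos ((pv_hdig c).mpr hd)]
      simp [pvCnt, List.countP_append, List.countP_cons, hd]
    · rw [if_neg (fun h => hd ((pv_hdig c).mp h))]
      simp [pvCnt, List.countP_append, List.countP_cons, hd]

theorem pv_foldl (s t : List Char) : ∀ p, t.foldl (pvAStep s) (pvState s p) = pvState s (p ++ t) := by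
  induction t with
  | nil => intro p; simp
  | cons c r ih =>
    intro p
    rw [List.foldl_cons, pvAStep_state, ih (p ++ [c])]
    simp

theorem pv_infix_dots_count (s : List Char) (h : ['.', '.'] <:+: s) : 2 ≤ s.count '.' := by
  have := h.sublist.count_le '.'
  simpa using this


set_option maxHeartbeats 1000000 in
theorem pv_final (s : List Char) (h : s ≠ []) : pvBad s s = !pvGood s := by
  rcases hh : s.head? with _ | hc
  · cases s with
    | nil => exact absurd rfl h
    | cons a t => simp at hh
  rcases hl : s.getLast? with _ | lc
  · rw [List.getLast?_eq_none_iff] at hl; exact absurd hl h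
  rw [Bool.eq_iff_iff, Bool.not_eq_true', ← Bool.not_eq_true (pvGood s)]
  simp only [pvBad, pvG, pvGood, Bool.or_eq_true, Bool.and_eq_true, Bool.not_eq_true',
    decide_eq_true_eq, beq_eq_false_iff_ne, ne_eq]
  rw [slice1neg1, pv_pyGetDneg1 s h, pv_pyGetD0 s, hh, hl]
  rw [pv_isIn_single, pv_isIn_single]
  rw [PySem.Chars.isIn_iff_infix, PySem.Chars.isIn_iff_infix]
  have hany : (s.any fun c => !pvValid c) = true ↔ ¬ (∀ c ∈ s, pvValid c = true) := by
    simp [List.any_eq_true]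
  have hcnt : ((2:Nat) ≤ s.count '.') ↔ ¬ (s.count '.' ≤ 1) := by omega
  have hdots := pv_infix_dots_count s
  have hlast : ((Option.some lc).getD ' ' == '-') = true ↔ lc = '-' := by simp
  have hhead : ((Option.some hc).getD ' ' == '.') = true ↔ hc = '.' := by simp
  rw [hany, hcnt, hlast, hhead]
  simp only [List.drop_one, List.all_eq_true, Option.some.injEq, PySem.Chars.isIn_iff_infix,
    List.singleton_infix_iff, decide_eq_false_iff_not]
  constructor
  · intro hbad hgood
    rcases hgood with ⟨⟨⟨⟨⟨g1, g2⟩, g3⟩, g4⟩, g5⟩, g6⟩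
    rcases hbad with (((((b | b) | b) | b) | b) | b) | b
    · exact g3 b
    · exact g4 b
    · exact g5 b
    · exact g6 b
    · exact (hcnt.mp (hdots b)) g2
    · exact b g1
    · exact b g2
  · intro hgood
    by_cases g1 : ∀ c ∈ s, pvValid c = true
    · by_cases g2 : s.count '.' ≤ 1
      · by_cases g3 : ['-', '.'] <:+: s
        · exact Or.inl (Or.inl (Or.inl (Or.inl (Or.inl (Or.inl g3)))))
        · by_cases g4 : '-' ∈ s.tail.dropLast
          · exact Or.inl (Or.inl (Or.inl (Or.inl (Or.inl (Or.inr g4)))))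
          · by_cases g5 : lc = '-'
            · exact Or.inl (Or.inl (Or.inl (Or.inl (Or.inr g5))))
            · by_cases g6 : hc = '.'
              · exact Or.inl (Or.inl (Or.inl (Or.inr g6)))
              · exact absurd ⟨⟨⟨⟨⟨g1, g2⟩, g3⟩, g4⟩, g5⟩, g6⟩ hgood
      · exact Or.inr g2
    · exact Or.inl (Or.inr g1)


theorem pvA_closed (s : List Char) :
    ((PySem.List.pyRange 0 (PySem.List.len s)).foldl
        (fun st i => pvAStep s st (PySem.List.pyGetD s i ' '))
        ((some 0 : Option Int), ([' '] : List Char), ([] : List Char))).1 =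
      if s = [] then some 0 else if pvGood s = true then some (pvCnt s) else none := by
  rw [PySem.List.foldl_pyRange_pyGetD s ' ' (pvAStep s) _ (le_refl 0)]
  have hinit : ((some 0 : Option Int), ([' '] : List Char), ([] : List Char)) = pvState s [] := by
    simp [pvState, pvCnt]
  rw [show Int.toNat 0 = 0 from rfl, List.drop_zero, hinit, pv_foldl s s []]
  simp only [List.nil_append]
  unfold pvState
  by_cases hs : s = []
  · subst hs; simp [pvCnt]
  · have h1 : (!s.isEmpty && pvBad s s) = (!pvGood s) := by
      rw [pv_final s hs]
      cases s with
      | nil => exact absurd rfl hs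
      | cons a t => simp
    rw [h1]
    cases hg : pvGood s <;> simp [hs, hg]

-- ===== VERDICT (by name: the statement is the Claim_ definition above) =====
theorem getNumberOfDigitsOctal_spec : Claim_equal_getNumberOfDigitsOctal := by
  intro number _
  unfold Spec_getNumberOfDigitsOctal getNumberOfDigitsOctal getNumberOfDigitsOctal_alt
  rw [pvA_closed]
  by_cases h : number.toList = []
  · simp [h, PySem.Str.len_eq]
  · rw [pvB_closed _ h]
    have hne : number ≠ "" := fun he => h (by simp [he])
    simp [h, hne, PySem.Str.len_eq]
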